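-- pv_equiv track=rewrite | github.com/arazazi/vulntron | plugins/inventory.py | _build_role_evidence
-- ===== SOURCE A (Python) =====
-- from typing import Any, Dict, List, Optional, Tuple
--
-- _ROLE_PORT_MAP: List[Tuple[frozenset, str]] = [
--     (frozenset({25, 465, 587, 110, 143, 993, 995}), "mail-server"),
--     (frozenset({53}),                               "dns-server"),
--     (frozenset({1433, 1521, 3306, 5432, 27017}),    "database-server"),
--     (frozenset({161, 162}),                         "network-device"),
--     (frozenset({80, 443, 8080, 8443}),              "web-server"),
--     (frozenset({445, 139}),                         "file-server"),
--     (frozenset({3389}),                             "workstation"),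
--     (frozenset({23}),                               "legacy-device"),
--     (frozenset({22}),                               "server"),
-- ]
--
-- def _build_role_evidence(
--     role: str, tcp_ports: List[int], udp_ports: List[int]
-- ) -> List[str]:
--     """Return a list of evidence strings that justify the role label."""
--     evidence: List[str] = []
--     all_ports = set(tcp_ports) | set(udp_ports)
--     for port_set, label in _ROLE_PORT_MAP:
--         matched = all_ports & port_set
--         if matched and label == role:
--             for p in sorted(matched):
--                 proto = "tcp" if p in set(tcp_ports) else "udp"
--                 evidence.append(f"port {p}/{proto} open → {label}")
--     if not evidence and role == "unknown":
--         evidence.append("no recognisable service ports; role undetermined")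
--     return evidence
-- ===== SOURCE B (Python) =====
-- from typing import List
--
-- # Inverted index: each service port maps directly to the role it evidences.
-- _PORT_ROLE = {
--     25: "mail-server", 465: "mail-server", 587: "mail-server",
--     110: "mail-server", 143: "mail-server", 993: "mail-server", 995: "mail-server",
--     53: "dns-server",
--     1433: "database-server", 1521: "database-server", 3306: "database-server",
--     5432: "database-server", 27017: "database-server",
--     161: "network-device", 162: "network-device",
--     80: "web-server", 443: "web-server", 8080: "web-server", 8443: "web-server",
--     445: "file-server", 139: "file-server",
--     3389: "workstation",
--     23: "legacy-device",
--     22: "server",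
-- }
--
-- def _build_role_evidence(
--     role: str, tcp_ports: List[int], udp_ports: List[int]
-- ) -> List[str]:
--     """Return a list of evidence strings that justify the role label."""
--     tcp = set(tcp_ports)
--     evidence = [
--         f"port {p}/{'tcp' if p in tcp else 'udp'} open \u2192 {role}"
--         for p in sorted(tcp | set(udp_ports))
--         if _PORT_ROLE.get(p) == role
--     ]
--     if not evidence and role == "unknown":
--         evidence.append("no recognisable service ports; role undetermined")
--     return evidence
-- ===== Notes on version B (the rewrite author's own statement) =====
-- stated objective: alternative
-- what changed: B inverts the role map into a port->role index and makes a single pass over the sorted distinct open ports, looking each port up directly; A's outer scan over the role-map entries, the per-entry set intersections and the per-entry sorted() call disappear.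
import Mathlib
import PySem

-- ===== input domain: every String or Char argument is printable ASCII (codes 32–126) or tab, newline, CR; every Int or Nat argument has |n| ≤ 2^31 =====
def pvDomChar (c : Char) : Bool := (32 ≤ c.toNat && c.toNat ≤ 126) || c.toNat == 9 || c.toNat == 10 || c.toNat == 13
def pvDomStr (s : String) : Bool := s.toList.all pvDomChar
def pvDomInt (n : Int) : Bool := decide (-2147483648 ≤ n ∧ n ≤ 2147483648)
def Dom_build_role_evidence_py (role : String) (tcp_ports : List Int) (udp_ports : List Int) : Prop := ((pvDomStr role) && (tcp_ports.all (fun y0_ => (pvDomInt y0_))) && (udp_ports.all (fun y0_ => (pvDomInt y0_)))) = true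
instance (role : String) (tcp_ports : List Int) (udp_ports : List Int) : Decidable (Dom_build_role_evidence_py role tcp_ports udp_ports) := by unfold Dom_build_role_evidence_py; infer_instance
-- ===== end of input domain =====

-- B inverts the role map into a port → role index and makes ONE pass over the sorted
-- distinct open ports, so the scan over the role-map entries and the per-entry set
-- intersections disappear (objective: alternative).

-- ===== PORT A =====
-- _ROLE_PORT_MAP: the frozenset literals are nodup, so the element lists are the sets.
def pvRoleMap : List (List Int × String) :=
  [([25, 465, 587, 110, 143, 993, 995], "mail-server"),
   ([53],                               "dns-server"),
   ([1433, 1521, 3306, 5432, 27017],    "database-server"),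
   ([161, 162],                         "network-device"),
   ([80, 443, 8080, 8443],              "web-server"),
   ([445, 139],                         "file-server"),
   ([3389],                             "workstation"),
   ([23],                               "legacy-device"),
   ([22],                               "server")]

def build_role_evidence_py (role : String) (tcp_ports : List Int) (udp_ports : List Int) : List String :=
  let all_ports : PySem.Set Int := PySem.Set.union (PySem.Set.ofList tcp_ports) (PySem.Set.ofList udp_ports)
  let evidence : List String := pvRoleMap.foldl (fun evidence entry =>
    let matched : PySem.Set Int := PySem.Set.inter all_ports entry.1
    if matched ≠ [] ∧ entry.2 = role then
      evidence ++ (PySem.List.sorted matched (fun x => x) false).map (fun p =>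
        let proto : String := if p ∈ PySem.Set.ofList tcp_ports then "tcp" else "udp"
        "port " ++ PySem.Int.toStr p ++ "/" ++ proto ++ " open → " ++ entry.2)
    else evidence) []
  if evidence = [] ∧ role = "unknown" then
    evidence ++ ["no recognisable service ports; role undetermined"]
  else evidence

-- ===== PORT B =====
-- _PORT_ROLE: the inverted index, each service port mapped to the role it evidences.
def pvPortPairs : List (Int × String) :=
  [(25, "mail-server"), (465, "mail-server"), (587, "mail-server"),
   (110, "mail-server"), (143, "mail-server"), (993, "mail-server"), (995, "mail-server"),
   (53, "dns-server"),
   (1433, "database-server"), (1521, "database-server"), (3306, "database-server"),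
   (5432, "database-server"), (27017, "database-server"),
   (161, "network-device"), (162, "network-device"),
   (80, "web-server"), (443, "web-server"), (8080, "web-server"), (8443, "web-server"),
   (445, "file-server"), (139, "file-server"),
   (3389, "workstation"),
   (23, "legacy-device"),
   (22, "server")]

def pvPortRole : PySem.Dict Int String := PySem.Dict.ofList pvPortPairs

def build_role_evidence_py_alt (role : String) (tcp_ports : List Int) (udp_ports : List Int) : List String :=
  let tcp : PySem.Set Int := PySem.Set.ofList tcp_ports
  let evidence : List String :=
    ((PySem.List.sorted (PySem.Set.union tcp (PySem.Set.ofList udp_ports)) (fun x => x) false).filter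
        (fun p => PySem.Dict.get? pvPortRole p == some role)).map (fun p =>
      "port " ++ PySem.Int.toStr p ++ "/" ++ (if p ∈ tcp then "tcp" else "udp") ++ " open → " ++ role)
  if evidence = [] ∧ role = "unknown" then
    evidence ++ ["no recognisable service ports; role undetermined"]
  else evidence

-- ===== PRECONDITION & SPEC =====
def Spec_build_role_evidence_py (role : String) (tcp_ports : List Int) (udp_ports : List Int) (out : List String) : Prop := out = build_role_evidence_py_alt role tcp_ports udp_ports
instance (role : String) (tcp_ports : List Int) (udp_ports : List Int) (out : List String) : Decidable (Spec_build_role_evidence_py role tcp_ports udp_ports out) := by unfold Spec_build_role_evidence_py; infer_instance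

-- ===== CLAIM (what is proved, stated in full; the proofs are below) =====
def Claim_equal_build_role_evidence_py : Prop := ∀ (role : String) (tcp_ports : List Int) (udp_ports : List Int), Dom_build_role_evidence_py role tcp_ports udp_ports → Spec_build_role_evidence_py role tcp_ports udp_ports (build_role_evidence_py role tcp_ports udp_ports)

-- ===== LEMMAS AND PROOFS =====

-- B's dict lookup is a first-match scan of the literal pair list.
lemma get?_pvPortRole (x : Int) : PySem.Dict.get? pvPortRole x = (pvPortPairs.find? (fun kv => kv.1 == x)).map Prod.snd := by
  have h : pvPortRole.items = pvPortPairs := by decide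
  simp [PySem.Dict.get?, h]

-- per label L: the lookup returns L exactly on the ports of A's entry for L
lemma pred_mail (x : Int) : ((PySem.Dict.get? pvPortRole x) == some "mail-server") = true ↔ x ∈ ([25, 465, 587, 110, 143, 993, 995] : List Int) := by
  rw [get?_pvPortRole]
  simp only [pvPortPairs, List.find?]
  repeat' split
  all_goals simp_all
  all_goals omega

lemma pred_dns (x : Int) : ((PySem.Dict.get? pvPortRole x) == some "dns-server") = true ↔ x ∈ ([53] : List Int) := by
  rw [get?_pvPortRole]
  simp only [pvPortPairs, List.find?]
  repeat' split
  all_goals simp_all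
  all_goals omega

lemma pred_db (x : Int) : ((PySem.Dict.get? pvPortRole x) == some "database-server") = true ↔ x ∈ ([1433, 1521, 3306, 5432, 27017] : List Int) := by
  rw [get?_pvPortRole]
  simp only [pvPortPairs, List.find?]
  repeat' split
  all_goals simp_all
  all_goals omega

lemma pred_net (x : Int) : ((PySem.Dict.get? pvPortRole x) == some "network-device") = true ↔ x ∈ ([161, 162] : List Int) := by
  rw [get?_pvPortRole]
  simp only [pvPortPairs, List.find?]
  repeat' split
  all_goals simp_all
  all_goals omega

lemma pred_web (x : Int) : ((PySem.Dict.get? pvPortRole x) == some "web-server") = true ↔ x ∈ ([80, 443, 8080, 8443] : List Int) := by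
  rw [get?_pvPortRole]
  simp only [pvPortPairs, List.find?]
  repeat' split
  all_goals simp_all
  all_goals omega

lemma pred_file (x : Int) : ((PySem.Dict.get? pvPortRole x) == some "file-server") = true ↔ x ∈ ([445, 139] : List Int) := by
  rw [get?_pvPortRole]
  simp only [pvPortPairs, List.find?]
  repeat' split
  all_goals simp_all
  all_goals omega

lemma pred_ws (x : Int) : ((PySem.Dict.get? pvPortRole x) == some "workstation") = true ↔ x ∈ ([3389] : List Int) := by
  rw [get?_pvPortRole]
  simp only [pvPortPairs, List.find?]
  repeat' split
  all_goals simp_all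
  all_goals omega

lemma pred_legacy (x : Int) : ((PySem.Dict.get? pvPortRole x) == some "legacy-device") = true ↔ x ∈ ([23] : List Int) := by
  rw [get?_pvPortRole]
  simp only [pvPortPairs, List.find?]
  repeat' split
  all_goals simp_all
  all_goals omega

lemma pred_srv (x : Int) : ((PySem.Dict.get? pvPortRole x) == some "server") = true ↔ x ∈ ([22] : List Int) := by
  rw [get?_pvPortRole]
  simp only [pvPortPairs, List.find?]
  repeat' split
  all_goals simp_all
  all_goals omega

-- for a role that labels no entry the lookup test never fires
lemma pred_none (role : String) (h1 : role ≠ "mail-server") (h2 : role ≠ "dns-server")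
    (h3 : role ≠ "database-server") (h4 : role ≠ "network-device") (h5 : role ≠ "web-server")
    (h6 : role ≠ "file-server") (h7 : role ≠ "workstation") (h8 : role ≠ "legacy-device")
    (h9 : role ≠ "server") (x : Int) :
    ((PySem.Dict.get? pvPortRole x) == some role) = false := by
  rw [get?_pvPortRole]
  rcases hfind : pvPortPairs.find? (fun kv => kv.1 == x) with _ | kv
  · rw [hfind]; rfl
  · obtain ⟨k, v⟩ := kv
    have hmem := List.mem_of_find?_eq_some hfind
    have hv : v ∈ (["mail-server","dns-server","database-server","network-device","web-server","file-server","workstation","legacy-device","server"] : List String) := by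
      fin_cases hmem <;> decide
    rw [hfind]
    simp only [List.mem_cons, List.not_mem_nil, or_false] at hv
    rcases hv with rfl|rfl|rfl|rfl|rfl|rfl|rfl|rfl|rfl <;>
      simp [beq_eq_false_iff_ne, Ne.symm h1, Ne.symm h2, Ne.symm h3, Ne.symm h4, Ne.symm h5, Ne.symm h6, Ne.symm h7, Ne.symm h8, Ne.symm h9]

-- sorted(all ∩ S) is the pred-filter of sorted(all), when pred tests membership in S
lemma sorted_inter_eq_filter_sorted (all S : List Int) (hall : all.Nodup)
    (pred : Int → Bool) (hpred : ∀ x, pred x = true ↔ x ∈ S) :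
    PySem.List.sorted (PySem.Set.inter all S) (fun x => x) false
      = (PySem.List.sorted all (fun x => x) false).filter pred := by
  have hsnd : (PySem.List.sorted all (fun x : Int => x) false).Nodup :=
    ((PySem.List.sorted_perm all (fun x : Int => x) false).nodup_iff).mpr hall
  apply PySem.List.sorted_eq_of_perm_of_pairwise_lt
  · rw [List.perm_ext_iff_of_nodup (List.Nodup.filter _ hsnd) (PySem.Set.nodup_inter all S hall)]
    intro a
    simp [List.mem_filter, PySem.List.mem_sorted, PySem.Set.mem_inter, hpred]
  · exact List.Pairwise.filter _
      (((PySem.List.sorted_pairwise all (fun x : Int => x) ).and hsnd).imp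
        (fun h => lt_of_le_of_ne h.1 h.2))

-- the surviving branch of A's loop equals B's filter of the sorted port union
lemma branch_eq (f : Int → String) (tcp udp S : List Int) (pred : Int → Bool)
    (hpred : ∀ x, pred x = true ↔ x ∈ S) :
    (if PySem.Set.inter (PySem.Set.union (PySem.Set.ofList tcp) (PySem.Set.ofList udp)) S ≠ ([] : List Int) then
      (PySem.List.sorted (PySem.Set.inter (PySem.Set.union (PySem.Set.ofList tcp) (PySem.Set.ofList udp)) S) (fun x => x) false).map f
    else [])
    = ((PySem.List.sorted (PySem.Set.union (PySem.Set.ofList tcp) (PySem.Set.ofList udp)) (fun x => x) false).filter pred).map f := by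
  have hnod : (PySem.Set.union (PySem.Set.ofList tcp) (PySem.Set.ofList udp) : List Int).Nodup :=
    PySem.Set.nodup_union _ _ (PySem.Set.nodup_ofList tcp)
  have key := sorted_inter_eq_filter_sorted (PySem.Set.union (PySem.Set.ofList tcp) (PySem.Set.ofList udp)) S hnod pred hpred
  split_ifs with h
  · rw [key]
  · rw [not_ne_iff] at h
    rw [← key, h]
    rfl

-- moving '++' out of the loop body: if c then acc ++ m else acc  =  acc ++ (if c then m else [])
lemma ite_append_nil (c : Prop) [Decidable c] (acc m : List String) :
    (if c then acc ++ m else acc) = acc ++ (if c then m else []) := by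
  split_ifs <;> simp

-- ===== VERDICT (by name: the statement is the Claim_ definition above) =====
theorem build_role_evidence_py_spec : Claim_equal_build_role_evidence_py := by
  intro role tcp udp _
  show build_role_evidence_py role tcp udp = build_role_evidence_py_alt role tcp udp
  simp only [build_role_evidence_py, build_role_evidence_py_alt]
  rw [PySem.List.foldl_congr_mem pvRoleMap _
    (fun acc (entry : List Int × String) => acc ++
      (if PySem.Set.inter (PySem.Set.union (PySem.Set.ofList tcp) (PySem.Set.ofList udp)) entry.1 ≠ ([] : List Int) ∧ entry.2 = role then
        (PySem.List.sorted (PySem.Set.inter (PySem.Set.union (PySem.Set.ofList tcp) (PySem.Set.ofList udp)) entry.1) (fun x => x) false).map (fun p =>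
          "port " ++ PySem.Int.toStr p ++ "/" ++ (if p ∈ PySem.Set.ofList tcp then "tcp" else "udp") ++ " open → " ++ entry.2)
      else [])) []
    (by intro acc e he; exact ite_append_nil _ _ _)]
  rw [PySem.List.foldl_append_eq_flatMap]
  by_cases h1 : role = "mail-server"
  · subst h1
    simp only [pvRoleMap, List.flatMap_cons, List.flatMap_nil, String.reduceEq, and_false,
      and_true, if_false, List.append_nil, List.nil_append, ne_eq]
    exact branch_eq _ tcp udp _ _ (pred_mail)
  by_cases h2 : role = "dns-server"
  · subst h2
    simp only [pvRoleMap, List.flatMap_cons, List.flatMap_nil, String.reduceEq, and_false,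
      and_true, if_false, List.append_nil, List.nil_append, ne_eq]
    exact branch_eq _ tcp udp _ _ (pred_dns)
  by_cases h3 : role = "database-server"
  · subst h3
    simp only [pvRoleMap, List.flatMap_cons, List.flatMap_nil, String.reduceEq, and_false,
      and_true, if_false, List.append_nil, List.nil_append, ne_eq]
    exact branch_eq _ tcp udp _ _ (pred_db)
  by_cases h4 : role = "network-device"
  · subst h4
    simp only [pvRoleMap, List.flatMap_cons, List.flatMap_nil, String.reduceEq, and_false,
      and_true, if_false, List.append_nil, List.nil_append, ne_eq]
    exact branch_eq _ tcp udp _ _ (pred_net)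
  by_cases h5 : role = "web-server"
  · subst h5
    simp only [pvRoleMap, List.flatMap_cons, List.flatMap_nil, String.reduceEq, and_false,
      and_true, if_false, List.append_nil, List.nil_append, ne_eq]
    exact branch_eq _ tcp udp _ _ (pred_web)
  by_cases h6 : role = "file-server"
  · subst h6
    simp only [pvRoleMap, List.flatMap_cons, List.flatMap_nil, String.reduceEq, and_false,
      and_true, if_false, List.append_nil, List.nil_append, ne_eq]
    exact branch_eq _ tcp udp _ _ (pred_file)
  by_cases h7 : role = "workstation"
  · subst h7
    simp only [pvRoleMap, List.flatMap_cons, List.flatMap_nil, String.reduceEq, and_false,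
      and_true, if_false, List.append_nil, List.nil_append, ne_eq]
    exact branch_eq _ tcp udp _ _ (pred_ws)
  by_cases h8 : role = "legacy-device"
  · subst h8
    simp only [pvRoleMap, List.flatMap_cons, List.flatMap_nil, String.reduceEq, and_false,
      and_true, if_false, List.append_nil, List.nil_append, ne_eq]
    exact branch_eq _ tcp udp _ _ (pred_legacy)
  by_cases h9 : role = "server"
  · subst h9
    simp only [pvRoleMap, List.flatMap_cons, List.flatMap_nil, String.reduceEq, and_false,
      and_true, if_false, List.append_nil, List.nil_append, ne_eq]
    exact branch_eq _ tcp udp _ _ (pred_srv)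
  have hflt : (PySem.List.sorted (PySem.Set.union (PySem.Set.ofList tcp) (PySem.Set.ofList udp)) (fun x : Int => x) false).filter
      (fun p => PySem.Dict.get? pvPortRole p == some role) = [] :=
    List.filter_eq_nil_iff.mpr (fun a _ => by simp [pred_none role h1 h2 h3 h4 h5 h6 h7 h8 h9 a])
  rw [hflt]
  simp [pvRoleMap, Ne.symm h1, Ne.symm h2, Ne.symm h3, Ne.symm h4, Ne.symm h5, Ne.symm h6, Ne.symm h7, Ne.symm h8, Ne.symm h9]
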